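-- pv_equiv track=rewrite | github.com/serevinaash/sistemrekomendasihybrid | utils.py | _combine_nasi
-- ===== SOURCE A (Python) =====
-- def _combine_nasi(lst):
--     """Helper untuk combine nasi+color dari list format"""
--     result = []
--     i = 0
--     lst_lower = [str(k).lower().strip() for k in lst]
--
--     while i < len(lst_lower):
--         item = lst_lower[i]
--
--         if item == 'nasi' and i + 1 < len(lst_lower):
--             next_item = lst_lower[i + 1]
--             if next_item in ['merah', 'putih', 'kuning', 'hitam']:
--                 result.append(f"{item} {next_item}")
--                 i += 2
--                 continue
--
--         result.append(item)
--         i += 1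
--
--     return result
-- ===== SOURCE B (Python) =====
-- def _combine_nasi(lst):
--     """Helper untuk combine nasi+color dari list format"""
--     colors = {'merah', 'putih', 'kuning', 'hitam'}
--     result = []
--     for item in (str(k).lower().strip() for k in lst):
--         if item in colors and result and result[-1] == 'nasi':
--             result[-1] = f"nasi {item}"
--         else:
--             result.append(item)
--     return result
-- ===== Notes on version B (the rewrite author's own statement) =====
-- stated objective: simpler
-- what changed: Replaced A's index-based while loop with look-ahead and i+=2 skip by a single left fold with a look-behind accumulator that overwrites the previously appended 'nasi' when a color token arrives.
import Mathlib
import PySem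

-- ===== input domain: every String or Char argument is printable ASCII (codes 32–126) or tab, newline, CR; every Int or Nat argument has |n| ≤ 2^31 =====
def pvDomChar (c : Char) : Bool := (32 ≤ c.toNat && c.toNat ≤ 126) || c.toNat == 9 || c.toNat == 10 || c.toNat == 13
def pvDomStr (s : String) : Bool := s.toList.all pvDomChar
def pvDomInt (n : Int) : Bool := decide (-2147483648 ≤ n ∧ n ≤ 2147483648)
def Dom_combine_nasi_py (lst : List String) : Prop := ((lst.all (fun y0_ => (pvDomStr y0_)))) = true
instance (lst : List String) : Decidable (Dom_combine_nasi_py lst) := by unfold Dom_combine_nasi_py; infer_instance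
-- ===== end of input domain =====

-- B replaces A's look-ahead-and-skip index loop by a single left fold with a
-- look-behind accumulator that overwrites the previously appended 'nasi'
-- (objective: simpler decomposition; same O(n) cost).

-- ===== PORT A =====
-- A's while-loop over indices, as the obvious structural recursion on the
-- normalized list; the i += 2 'continue' is the two-cons pattern.
def combine_nasi_goA : List String → List String
  | [] => []
  | item :: rest =>
    if item = "nasi" then
      match rest with
      | next_item :: rest' =>
        if next_item ∈ ["merah", "putih", "kuning", "hitam"] then
          (item ++ " " ++ next_item) :: combine_nasi_goA rest'
        else
          item :: combine_nasi_goA (next_item :: rest')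
      | [] => [item]
    else
      item :: combine_nasi_goA rest
termination_by l => l.length
decreasing_by all_goals (simp only [List.length_cons]; omega)

def combine_nasi_py (lst : List String) : List String :=
  combine_nasi_goA (lst.map (fun k => PySem.Str.strip (PySem.Str.lower k)))

-- ===== PORT B =====
-- one fold step: merge into the previously appended element, else append
def combine_nasi_stepB (result : List String) (item : String) : List String :=
  if item ∈ ["merah", "putih", "kuning", "hitam"] ∧ result ≠ [] ∧
      result.getLast? = some "nasi" then
    result.dropLast ++ ["nasi " ++ item]
  else
    result ++ [item]

def combine_nasi_py_alt (lst : List String) : List String :=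
  (lst.map (fun k => PySem.Str.strip (PySem.Str.lower k))).foldl combine_nasi_stepB []

-- ===== PRECONDITION & SPEC =====
def Spec_combine_nasi_py (lst : List String) (out : List String) : Prop := out = combine_nasi_py_alt lst
instance (lst : List String) (out : List String) : Decidable (Spec_combine_nasi_py lst out) := by unfold Spec_combine_nasi_py; infer_instance

-- ===== CLAIM (what is proved, stated in full; the proofs are below) =====
def Claim_equal_combine_nasi_py : Prop := ∀ (lst : List String), Dom_combine_nasi_py lst → Spec_combine_nasi_py lst (combine_nasi_py lst)

-- ===== LEMMAS AND PROOFS =====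

-- The fold step only looks at the last element of the accumulator, so a
-- nonempty accumulator suffix commutes out of the fold.
lemma foldB_append (l : List String) : ∀ (a b : List String), b ≠ [] →
    List.foldl combine_nasi_stepB (a ++ b) l = a ++ List.foldl combine_nasi_stepB b l := by
  induction l with
  | nil => intro a b _; simp
  | cons t l ih =>
    intro a b hb
    simp only [List.foldl_cons]
    have hlast : (a ++ b).getLast? = b.getLast? := List.getLast?_append_of_ne_nil a hb
    by_cases hc : t ∈ ["merah", "putih", "kuning", "hitam"] ∧ b ≠ [] ∧ b.getLast? = some "nasi"
    · have h1 : combine_nasi_stepB (a ++ b) t = a ++ (b.dropLast ++ ["nasi " ++ t]) := by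
        unfold combine_nasi_stepB
        rw [if_pos ⟨hc.1, by simp [hb], by rw [hlast]; exact hc.2.2⟩,
            List.dropLast_append_of_ne_nil hb, List.append_assoc]
      have h2 : combine_nasi_stepB b t = b.dropLast ++ ["nasi " ++ t] := by
        unfold combine_nasi_stepB; rw [if_pos hc]
      rw [h1, h2, ih _ _ (by simp)]
    · have h1 : combine_nasi_stepB (a ++ b) t = a ++ (b ++ [t]) := by
        unfold combine_nasi_stepB
        rw [if_neg, List.append_assoc]
        rintro ⟨hc1, _, hc3⟩
        exact hc ⟨hc1, hb, by rw [← hlast]; exact hc3⟩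
      have h2 : combine_nasi_stepB b t = b ++ [t] := by
        unfold combine_nasi_stepB; rw [if_neg]
        rintro ⟨hc1, _, hc3⟩; exact hc ⟨hc1, hb, hc3⟩
      rw [h1, h2, ih _ _ (by simp)]

-- Starting the fold from a single non-'nasi' element just prepends it.
lemma foldB_cons_ne (l : List String) (x : String) (hx : x ≠ "nasi") :
    List.foldl combine_nasi_stepB [x] l = x :: List.foldl combine_nasi_stepB [] l := by
  cases l with
  | nil => rfl
  | cons t l =>
    simp only [List.foldl_cons]
    have h1 : combine_nasi_stepB [x] t = [x] ++ [t] := by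
      unfold combine_nasi_stepB
      rw [if_neg (by rintro ⟨_, _, h3⟩; exact hx (by simpa using h3))]
    have h2 : combine_nasi_stepB [] t = [t] := by
      unfold combine_nasi_stepB
      rw [if_neg (by rintro ⟨_, h2, _⟩; exact h2 rfl)]
      rfl
    rw [h1, h2, foldB_append l [x] [t] (by simp)]
    rfl

lemma goA_merge (next_item : String) (rest' : List String)
    (h : next_item ∈ ["merah", "putih", "kuning", "hitam"]) :
    combine_nasi_goA ("nasi" :: next_item :: rest') =
      ("nasi" ++ " " ++ next_item) :: combine_nasi_goA rest' := by
  rw [combine_nasi_goA.eq_def]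
  simp [h]

lemma goA_nomerge (next_item : String) (rest' : List String)
    (h : next_item ∉ ["merah", "putih", "kuning", "hitam"]) :
    combine_nasi_goA ("nasi" :: next_item :: rest') =
      "nasi" :: combine_nasi_goA (next_item :: rest') := by
  rw [combine_nasi_goA.eq_def]
  simp [h]

lemma goA_other (item : String) (rest : List String) (h : item ≠ "nasi") :
    combine_nasi_goA (item :: rest) = item :: combine_nasi_goA rest := by
  rw [combine_nasi_goA.eq_def]
  simp [h]

lemma foldB_eq_goA : ∀ (l : List String),
    List.foldl combine_nasi_stepB [] l = combine_nasi_goA l := by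
  intro l
  induction l using combine_nasi_goA.induct with
  | case1 => simp [combine_nasi_goA]
  | case2 next_item rest' hcol ih =>
    simp only [List.foldl_cons]
    have h0 : combine_nasi_stepB [] "nasi" = ["nasi"] := by
      unfold combine_nasi_stepB
      rw [if_neg (by rintro ⟨_, h2, _⟩; exact h2 rfl)]
      rfl
    have h1 : combine_nasi_stepB ["nasi"] next_item = ["nasi " ++ next_item] := by
      unfold combine_nasi_stepB; rw [if_pos ⟨hcol, by simp, rfl⟩]; rfl
    have hne : "nasi " ++ next_item ≠ "nasi" := by
      fin_cases hcol <;> decide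
    have hsp : "nasi " ++ next_item = "nasi" ++ " " ++ next_item := by
      have h3 : ("nasi " : String) = "nasi" ++ " " := by decide
      rw [h3, String.append_assoc]
    rw [h0, h1, foldB_cons_ne _ _ hne, ih, goA_merge _ _ hcol, hsp]
  | case3 next_item rest' hcol ih =>
    simp only [List.foldl_cons]
    have h0 : combine_nasi_stepB [] "nasi" = ["nasi"] := by
      unfold combine_nasi_stepB
      rw [if_neg (by rintro ⟨_, h2, _⟩; exact h2 rfl)]
      rfl
    have h1 : combine_nasi_stepB ["nasi"] next_item = ["nasi"] ++ [next_item] := by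
      unfold combine_nasi_stepB
      rw [if_neg (by rintro ⟨hc, _, _⟩; exact hcol hc)]
    have h2 : combine_nasi_stepB [] next_item = [next_item] := by
      unfold combine_nasi_stepB
      rw [if_neg (by rintro ⟨_, h2, _⟩; exact h2 rfl)]
      rfl
    rw [h0, h1, foldB_append _ ["nasi"] [next_item] (by simp),
        goA_nomerge _ _ hcol, ← ih]
    simp only [List.foldl_cons, h2]
    rfl
  | case4 =>
    simp [combine_nasi_goA, combine_nasi_stepB]
  | case5 item rest hitem ih =>
    simp only [List.foldl_cons]
    have h0 : combine_nasi_stepB [] item = [item] := by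
      unfold combine_nasi_stepB
      rw [if_neg (by rintro ⟨_, h2, _⟩; exact h2 rfl)]
      rfl
    rw [h0, foldB_cons_ne _ _ hitem, ih, goA_other _ _ hitem]

-- ===== VERDICT (by name: the statement is the Claim_ definition above) =====
theorem combine_nasi_py_spec : Claim_equal_combine_nasi_py := by
  intro lst _
  unfold Spec_combine_nasi_py combine_nasi_py combine_nasi_py_alt
  exact (foldB_eq_goA _).symm
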